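-- pv_equiv track=rewrite | github.com/bonicim/technical_interviews_exposed | src/algorithms/interview_cake_questions/is_fifo.py | is_fifo_recursive_v2_helper
-- ===== SOURCE A (Python) =====
-- def is_fifo_recursive_v2_helper(
--     takeout, dine_in, served, takeout_index, dine_in_index, served_index
-- ):
--     if (
--         served_index == len(served)
--         and takeout_index == len(takeout)
--         and dine_in_index == len(dine_in)
--     ):
--         return True
--     elif served_index == len(served) and (
--         takeout_index < len(takeout) or dine_in_index < len(dine_in)
--     ):
--         return False
--     elif (
--         takeout_index < len(takeout) and takeout[takeout_index] == served[served_index]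
--     ):
--         return is_fifo_recursive_v2_helper(
--             takeout, dine_in, served, takeout_index + 1, dine_in_index, served_index + 1
--         )
--     elif (
--         dine_in_index < len(dine_in) and dine_in[dine_in_index] == served[served_index]
--     ):
--         return is_fifo_recursive_v2_helper(
--             takeout, dine_in, served, takeout_index, dine_in_index + 1, served_index + 1
--         )
--     else:
--         return False
-- ===== SOURCE B (Python) =====
-- def is_fifo_recursive_v2_helper(
--     takeout, dine_in, served, takeout_index, dine_in_index, served_index
-- ):
--     while served_index < len(served):
--         order = served[served_index]
--         if takeout_index < len(takeout) and takeout[takeout_index] == order: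
--             takeout_index += 1
--         elif dine_in_index < len(dine_in) and dine_in[dine_in_index] == order:
--             dine_in_index += 1
--         else:
--             return False
--         served_index += 1
--     return (
--         served_index == len(served)
--         and takeout_index == len(takeout)
--         and dine_in_index == len(dine_in)
--     )
-- ===== Notes on version B (the rewrite author's own statement) =====
-- stated objective: idiomatic
-- what changed: Replaced the recursive helper (which rebuilds a call frame per served order) by an in-place iterative while-loop over local index counters with a single post-loop exhaustion check.
-- outside the precondition, e.g. on is_fifo_recursive_v2_helper([], [], [1, 2], 0, 0, -5): A returns False, B raises IndexError; on is_fifo_recursive_v2_helper([1], [], [], -5, 0, 0): A returns False, B returns False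
import Mathlib
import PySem

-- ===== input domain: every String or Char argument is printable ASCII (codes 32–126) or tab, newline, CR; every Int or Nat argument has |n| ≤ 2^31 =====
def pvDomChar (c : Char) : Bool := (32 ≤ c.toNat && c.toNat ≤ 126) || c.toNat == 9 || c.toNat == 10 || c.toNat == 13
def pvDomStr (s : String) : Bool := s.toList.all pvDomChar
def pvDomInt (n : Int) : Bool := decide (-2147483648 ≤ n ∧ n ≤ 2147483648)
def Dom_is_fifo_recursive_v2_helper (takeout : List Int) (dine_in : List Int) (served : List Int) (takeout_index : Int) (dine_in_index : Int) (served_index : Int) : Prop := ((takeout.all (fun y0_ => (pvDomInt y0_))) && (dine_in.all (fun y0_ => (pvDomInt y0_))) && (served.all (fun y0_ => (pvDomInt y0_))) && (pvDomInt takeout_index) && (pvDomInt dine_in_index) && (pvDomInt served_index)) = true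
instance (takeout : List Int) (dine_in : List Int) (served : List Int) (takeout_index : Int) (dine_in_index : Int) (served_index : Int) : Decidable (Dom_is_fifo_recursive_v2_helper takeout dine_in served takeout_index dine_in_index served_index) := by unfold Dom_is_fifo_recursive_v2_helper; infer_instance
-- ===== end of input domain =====

-- B replaces A's recursion by an in-place iterative loop over the three index counters
-- (same greedy FIFO check, iterative decomposition); equivalence is about the return value.

-- ===== PORT A =====
-- 'xs[i] == ys[j]' on two possibly-raising accesses; 'false' where Python would raise
-- IndexError (those inputs are outside Pre_).
def pvEqGet (xs : List Int) (i : Int) (ys : List Int) (j : Int) : Bool :=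
  match PySem.List.pyGet? xs i, PySem.List.pyGet? ys j with
  | some a, some b => a == b
  | _, _ => false

theorem pvEqGet_snd_lt {xs : List Int} {i : Int} {ys : List Int} {j : Int}
    (h : pvEqGet xs i ys j = true) : j < (ys.length : Int) := by
  unfold pvEqGet at h
  rcases hx : PySem.List.pyGet? xs i with _ | a <;> rw [hx] at h
  · simp at h
  rcases hy : PySem.List.pyGet? ys j with _ | b <;> rw [hy] at h
  · simp at h
  by_cases hr : PySem.Raise.InRange ys.length j
  · simp [PySem.Raise.InRange] at hr; omega
  · rw [← PySem.List.pyGet?_eq_none_iff] at hr; rw [hr] at hy; exact absurd hy (by simp)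

def is_fifo_recursive_v2_helper (takeout : List Int) (dine_in : List Int) (served : List Int) (takeout_index : Int) (dine_in_index : Int) (served_index : Int) : Bool :=
  if served_index = (served.length : Int) ∧ takeout_index = (takeout.length : Int) ∧ dine_in_index = (dine_in.length : Int) then
    true
  else if served_index = (served.length : Int) ∧ (takeout_index < (takeout.length : Int) ∨ dine_in_index < (dine_in.length : Int)) then
    false
  else if h3 : takeout_index < (takeout.length : Int) ∧ pvEqGet takeout takeout_index served served_index = true then
    is_fifo_recursive_v2_helper takeout dine_in served (takeout_index + 1) dine_in_index (served_index + 1)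
  else if h4 : dine_in_index < (dine_in.length : Int) ∧ pvEqGet dine_in dine_in_index served served_index = true then
    is_fifo_recursive_v2_helper takeout dine_in served takeout_index (dine_in_index + 1) (served_index + 1)
  else
    false
termination_by ((served.length : Int) - served_index).toNat
decreasing_by
  · have := pvEqGet_snd_lt h3.2; omega
  · have := pvEqGet_snd_lt h4.2; omega

-- ===== PORT B =====
def is_fifo_recursive_v2_helper_alt (takeout : List Int) (dine_in : List Int) (served : List Int) (takeout_index : Int) (dine_in_index : Int) (served_index : Int) : Bool :=
  if _hs : served_index < (served.length : Int) then
    match PySem.List.pyGet? served served_index with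
    | none => false  -- Python raises IndexError here (outside Pre_)
    | some order =>
      if takeout_index < (takeout.length : Int) ∧ PySem.List.pyGet? takeout takeout_index = some order then
        is_fifo_recursive_v2_helper_alt takeout dine_in served (takeout_index + 1) dine_in_index (served_index + 1)
      else if dine_in_index < (dine_in.length : Int) ∧ PySem.List.pyGet? dine_in dine_in_index = some order then
        is_fifo_recursive_v2_helper_alt takeout dine_in served takeout_index (dine_in_index + 1) (served_index + 1)
      else
        false
  else
    decide (served_index = (served.length : Int)) &&
    decide (takeout_index = (takeout.length : Int)) &&
    decide (dine_in_index = (dine_in.length : Int))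
termination_by ((served.length : Int) - served_index).toNat
decreasing_by all_goals omega

-- ===== PRECONDITION & SPEC =====
-- Pre_ excludes indices below -len (where A usually raises IndexError, or — when the guards
-- never reach the access — returns a value by accident of the branch order) and served cursors
-- past the end while a queue is still live (where A raises IndexError); everywhere else,
-- including Python's in-range negative-index wraparound, A's value is claimed.
def Pre_is_fifo_recursive_v2_helper (takeout : List Int) (dine_in : List Int) (served : List Int) (takeout_index : Int) (dine_in_index : Int) (served_index : Int) : Prop :=
  (-(takeout.length : Int) ≤ takeout_index ∧ -(dine_in.length : Int) ≤ dine_in_index ∧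
   -(served.length : Int) ≤ served_index ∧ served_index ≤ (served.length : Int)) ∨
  ((takeout.length : Int) ≤ takeout_index ∧ (dine_in.length : Int) ≤ dine_in_index ∧ (served.length : Int) < served_index)
instance (takeout : List Int) (dine_in : List Int) (served : List Int) (takeout_index : Int) (dine_in_index : Int) (served_index : Int) : Decidable (Pre_is_fifo_recursive_v2_helper takeout dine_in served takeout_index dine_in_index served_index) := by unfold Pre_is_fifo_recursive_v2_helper; infer_instance

def pvWitness_is_fifo_recursive_v2_helper : List Int × List Int × List Int × Int × Int × Int := ([1], [2], [1, 2], 0, 0, 0)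

def Spec_is_fifo_recursive_v2_helper (takeout : List Int) (dine_in : List Int) (served : List Int) (takeout_index : Int) (dine_in_index : Int) (served_index : Int) (out : Bool) : Prop := out = is_fifo_recursive_v2_helper_alt takeout dine_in served takeout_index dine_in_index served_index
instance (takeout : List Int) (dine_in : List Int) (served : List Int) (takeout_index : Int) (dine_in_index : Int) (served_index : Int) (out : Bool) : Decidable (Spec_is_fifo_recursive_v2_helper takeout dine_in served takeout_index dine_in_index served_index out) := by unfold Spec_is_fifo_recursive_v2_helper; infer_instance

-- ===== CLAIM (what is proved, stated in full; the proofs are below) =====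
def Claim_equal_is_fifo_recursive_v2_helper : Prop := ∀ (takeout : List Int) (dine_in : List Int) (served : List Int) (takeout_index : Int) (dine_in_index : Int) (served_index : Int), Dom_is_fifo_recursive_v2_helper takeout dine_in served takeout_index dine_in_index served_index → Pre_is_fifo_recursive_v2_helper takeout dine_in served takeout_index dine_in_index served_index → Spec_is_fifo_recursive_v2_helper takeout dine_in served takeout_index dine_in_index served_index (is_fifo_recursive_v2_helper takeout dine_in served takeout_index dine_in_index served_index)

-- ===== LEMMAS AND PROOFS =====

theorem pvEqGet_none_right {xs : List Int} {i : Int} {ys : List Int} {j : Int}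
    (h : PySem.List.pyGet? ys j = none) : pvEqGet xs i ys j = false := by
  rcases hx : PySem.List.pyGet? xs i with _ | a <;> (unfold pvEqGet; rw [hx, h])


-- in-range nonnegative access always succeeds
theorem pvGet_some {xs : List Int} {i : Int} (h0 : -(xs.length : Int) ≤ i) (h1 : i < (xs.length : Int)) :
    ∃ a, PySem.List.pyGet? xs i = some a := by
  rcases hx : PySem.List.pyGet? xs i with _ | a
  · rw [PySem.List.pyGet?_eq_none_iff] at hx
    exact absurd ⟨by simpa using h0, h1⟩ hx
  · exact ⟨a, rfl⟩

-- main invariant: on the natural index region the two ports agree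
theorem pv_main (takeout dine_in served : List Int) :
    ∀ n (t d s : Int), ((served.length : Int) - s).toNat = n →
      -(takeout.length : Int) ≤ t → -(dine_in.length : Int) ≤ d →
      -(served.length : Int) ≤ s → s ≤ (served.length : Int) →
      is_fifo_recursive_v2_helper takeout dine_in served t d s =
      is_fifo_recursive_v2_helper_alt takeout dine_in served t d s := by
  intro n
  induction n with
  | zero =>
    intro t d s hn ht hd hs hsle
    have hse : s = (served.length : Int) := by omega
    rw [is_fifo_recursive_v2_helper, is_fifo_recursive_v2_helper_alt]
    rw [dif_neg (by omega : ¬ s < (served.length : Int))]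
    by_cases h1 : t = (takeout.length : Int) ∧ d = (dine_in.length : Int)
    · simp [hse, h1.1, h1.2]
    · have hrhs : (decide (s = (served.length : Int)) &&
          decide (t = (takeout.length : Int)) && decide (d = (dine_in.length : Int))) = false := by
        simp; omega
      rw [hrhs, if_neg (by tauto)]
      by_cases h2 : t < (takeout.length : Int) ∨ d < (dine_in.length : Int)
      · rw [if_pos ⟨hse, h2⟩]
      · rw [if_neg (by tauto)]
        have hget : PySem.List.pyGet? served s = none := by
          rw [PySem.List.pyGet?_eq_none_iff]; simp [PySem.Raise.InRange]; omega
        rw [dif_neg (by simp [pvEqGet_none_right hget]),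
            dif_neg (by simp [pvEqGet_none_right hget])]
  | succ n ih =>
    intro t d s hn ht hd hs hsle
    have hslt : s < (served.length : Int) := by omega
    obtain ⟨order, horder⟩ := pvGet_some hs hslt
    rw [is_fifo_recursive_v2_helper, is_fifo_recursive_v2_helper_alt]
    rw [if_neg (by omega : ¬ (s = (served.length : Int) ∧ t = (takeout.length : Int) ∧ d = (dine_in.length : Int))),
        if_neg (by omega : ¬ (s = (served.length : Int) ∧ (t < (takeout.length : Int) ∨ d < (dine_in.length : Int)))),
        dif_pos hslt, horder]
    dsimp only
    by_cases h3 : t < (takeout.length : Int) ∧ PySem.List.pyGet? takeout t = some order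
    · have h3' : t < (takeout.length : Int) ∧ pvEqGet takeout t served s = true := by
        refine ⟨h3.1, ?_⟩; unfold pvEqGet; rw [h3.2, horder]; simp
      rw [dif_pos h3', if_pos h3]
      exact ih (t + 1) d (s + 1) (by omega) (by omega) hd (by omega) (by omega)
    · have h3' : ¬ (t < (takeout.length : Int) ∧ pvEqGet takeout t served s = true) := by
        rintro ⟨hlt, heq⟩
        apply h3
        refine ⟨hlt, ?_⟩
        obtain ⟨a, ha⟩ := pvGet_some ht hlt
        unfold pvEqGet at heq
        rw [ha, horder] at heq
        simp at heq
        rw [ha, heq]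
      rw [dif_neg h3', if_neg h3]
      by_cases h4 : d < (dine_in.length : Int) ∧ PySem.List.pyGet? dine_in d = some order
      · have h4' : d < (dine_in.length : Int) ∧ pvEqGet dine_in d served s = true := by
          refine ⟨h4.1, ?_⟩; unfold pvEqGet; rw [h4.2, horder]; simp
        rw [dif_pos h4', if_pos h4]
        exact ih t (d + 1) (s + 1) (by omega) ht (by omega) (by omega) (by omega)
      · have h4' : ¬ (d < (dine_in.length : Int) ∧ pvEqGet dine_in d served s = true) := by
          rintro ⟨hlt, heq⟩
          apply h4
          refine ⟨hlt, ?_⟩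
          obtain ⟨a, ha⟩ := pvGet_some hd hlt
          unfold pvEqGet at heq
          rw [ha, horder] at heq
          simp at heq
          rw [ha, heq]
        rw [dif_neg h4', if_neg h4]

-- exhausted region: both queues consumed, served cursor past the end — both return false
theorem pv_past (takeout dine_in served : List Int) (t d s : Int)
    (h : (takeout.length : Int) ≤ t ∧ (dine_in.length : Int) ≤ d ∧ (served.length : Int) < s) :
    is_fifo_recursive_v2_helper takeout dine_in served t d s =
    is_fifo_recursive_v2_helper_alt takeout dine_in served t d s := by
  rw [is_fifo_recursive_v2_helper, is_fifo_recursive_v2_helper_alt]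
  rw [if_neg (by omega), if_neg (by omega), dif_neg (by rintro ⟨h3, _⟩; omega),
      dif_neg (by rintro ⟨h4, _⟩; omega), dif_neg (by omega)]
  simp
  omega

-- ===== VERDICT (by name: the statement is the Claim_ definition above) =====
theorem is_fifo_recursive_v2_helper_spec : Claim_equal_is_fifo_recursive_v2_helper := by
  intro takeout dine_in served t d s _ hpre
  unfold Spec_is_fifo_recursive_v2_helper
  rcases hpre with ⟨ht, hd, hs, hsle⟩ | h
  · exact pv_main takeout dine_in served _ t d s rfl ht hd hs hsle
  · exact pv_past takeout dine_in served t d s h
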